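-- pv_equiv track=rewrite | github.com/SckyzO/rackscope | src/rackscope/telemetry/planner.py | _count_target_ids
-- ===== SOURCE A (Python) =====
-- from typing import Dict, List, Iterable, Optional, Tuple
--
-- def _count_target_ids(targets_by_check: Dict[str, Dict[str, List[str]]]) -> int:
--     node_ids: set[str] = set()
--     chassis_ids: set[str] = set()
--     rack_ids: set[str] = set()
--     for targets in targets_by_check.values():
--         node_ids.update(targets.get("node", []))
--         chassis_ids.update(targets.get("chassis", []))
--         rack_ids.update(targets.get("rack", []))
--     return len(node_ids) + len(chassis_ids) + len(rack_ids)
-- ===== SOURCE B (Python) =====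
-- def _count_target_ids(targets_by_check):
--     pairs = []
--     for targets in targets_by_check.values():
--         for cat in ("node", "chassis", "rack"):
--             for tid in targets.get(cat, []):
--                 pairs.append((cat, tid))
--     pairs.sort()
--     count = 0
--     prev = None
--     for pair in pairs:
--         if pair != prev:
--             count += 1
--         prev = pair
--     return count
-- ===== Notes on version B (the rewrite author's own statement) =====
-- stated objective: alternative
-- what changed: Replaces A's three hash sets with a sort-then-scan algorithm: collect all (category, id) pairs into one list, sort it, and count positions where a pair differs from its predecessor (distinct pairs = sum of per-category distinct ids since the category tag keeps groups disjoint).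
import Mathlib
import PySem

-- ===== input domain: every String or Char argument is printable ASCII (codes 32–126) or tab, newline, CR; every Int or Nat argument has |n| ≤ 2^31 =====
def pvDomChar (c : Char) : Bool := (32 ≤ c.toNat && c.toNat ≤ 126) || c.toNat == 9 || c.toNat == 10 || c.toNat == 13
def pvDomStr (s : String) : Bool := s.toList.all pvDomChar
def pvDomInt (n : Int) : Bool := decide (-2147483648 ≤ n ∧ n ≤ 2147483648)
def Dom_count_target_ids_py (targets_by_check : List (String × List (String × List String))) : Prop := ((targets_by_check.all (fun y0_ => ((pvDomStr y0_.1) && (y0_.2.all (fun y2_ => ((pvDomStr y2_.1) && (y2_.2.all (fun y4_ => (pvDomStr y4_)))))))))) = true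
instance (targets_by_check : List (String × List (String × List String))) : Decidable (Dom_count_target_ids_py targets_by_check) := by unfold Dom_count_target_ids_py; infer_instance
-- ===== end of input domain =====

-- B replaces A's three hash sets by sort-then-scan: collect all (category, id) pairs,
-- sort them, count adjacent changes. Objective: alternative algorithm, same exact result.

-- ===== PORT A =====
-- one pass over dict values; three sets updated in step
def count_target_ids_py (targets_by_check : List (String × List (String × List String))) : Int :=
  let st :=
    ((PySem.Dict.ofList targets_by_check).values).foldl
      (fun (s : PySem.Set String × PySem.Set String × PySem.Set String) targets =>
        let d := PySem.Dict.ofList targets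
        (PySem.Set.update s.1 (d.getD "node" []),
         PySem.Set.update s.2.1 (d.getD "chassis" []),
         PySem.Set.update s.2.2 (d.getD "rack" [])))
      (PySem.Set.empty, PySem.Set.empty, PySem.Set.empty)
  ((PySem.Set.len st.1 : Int) + (PySem.Set.len st.2.1 : Int) + (PySem.Set.len st.2.2 : Int))

-- ===== PORT B =====
-- pairs.append((cat, tid)) over values × ("node","chassis","rack") × ids; pairs.sort();
-- then scan counting pair != prev (prev starts as None)
def count_target_ids_py_alt (targets_by_check : List (String × List (String × List String))) : Int :=
  let pairs :=
    ((PySem.Dict.ofList targets_by_check).values).foldl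
      (fun (acc : List (String × String)) targets =>
        ["node", "chassis", "rack"].foldl
          (fun acc cat =>
            ((PySem.Dict.ofList targets).getD cat []).foldl
              (fun acc tid => acc ++ [(cat, tid)]) acc)
          acc)
      []
  let sortedPairs := PySem.List.sorted2 pairs Prod.fst Prod.snd false
  (sortedPairs.foldl
    (fun (st : Int × Option (String × String)) pair =>
      (if some pair ≠ st.2 then st.1 + 1 else st.1, some pair))
    (0, none)).1

-- ===== PRECONDITION & SPEC =====
def Spec_count_target_ids_py (targets_by_check : List (String × List (String × List String))) (out : Int) : Prop := out = count_target_ids_py_alt targets_by_check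
instance (targets_by_check : List (String × List (String × List String))) (out : Int) : Decidable (Spec_count_target_ids_py targets_by_check out) := by unfold Spec_count_target_ids_py; infer_instance

-- ===== CLAIM (what is proved, stated in full; the proofs are below) =====
def Claim_equal_count_target_ids_py : Prop := ∀ (targets_by_check : List (String × List (String × List String))), Dom_count_target_ids_py targets_by_check → Spec_count_target_ids_py targets_by_check (count_target_ids_py targets_by_check)

-- ===== LEMMAS AND PROOFS =====

-- A's triple-set loop over the values equals three independent set-updates over the
-- concatenated per-category id lists.
theorem pvFoldl_triple_update
    (f g h : List (String × List String) → List String) :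
    ∀ (vs : List (List (String × List String)))
      (n c r : PySem.Set String),
      vs.foldl
        (fun (s : PySem.Set String × PySem.Set String × PySem.Set String) targets =>
          (PySem.Set.update s.1 (f targets),
           PySem.Set.update s.2.1 (g targets),
           PySem.Set.update s.2.2 (h targets)))
        (n, c, r)
      = (PySem.Set.update n (vs.flatMap f),
         PySem.Set.update c (vs.flatMap g),
         PySem.Set.update r (vs.flatMap h)) := by
  intro vs
  induction vs with
  | nil => intro n c r; simp [PySem.Set.update_nil]
  | cons v vs ih =>
      intro n c r
      simp only [List.foldl_cons, List.flatMap_cons, ih, PySem.Set.update_append]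

-- two set-builders with the same members have the same cardinality
theorem pvLenOfListCongr {α : Type} [BEq α] [LawfulBEq α] (xs ys : List α)
    (h : ∀ a, a ∈ xs ↔ a ∈ ys) :
    (PySem.Set.ofList xs).length = (PySem.Set.ofList ys).length := by
  apply List.Perm.length_eq
  rw [List.perm_ext_iff_of_nodup (PySem.Set.nodup_ofList xs) (PySem.Set.nodup_ofList ys)]
  intro a
  simp [PySem.Set.mem_ofList, h a]

-- B's pair-collection loop written as a flatMap
theorem pvPairsEq (vs : List (List (String × List String))) :
    vs.foldl
      (fun (acc : List (String × String)) targets =>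
        ["node", "chassis", "rack"].foldl
          (fun acc cat =>
            ((PySem.Dict.ofList targets).getD cat []).foldl
              (fun acc tid => acc ++ [(cat, tid)]) acc)
          acc)
      []
    = vs.flatMap (fun targets =>
        ["node", "chassis", "rack"].flatMap (fun cat =>
          ((PySem.Dict.ofList targets).getD cat []).map (fun tid => (cat, tid)))) := by
  have h1 : ∀ (targets : List (String × List String)) (acc : List (String × String)),
      ["node", "chassis", "rack"].foldl
        (fun acc cat =>
          ((PySem.Dict.ofList targets).getD cat []).foldl
            (fun acc tid => acc ++ [(cat, tid)]) acc)
        acc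
      = acc ++ ["node", "chassis", "rack"].flatMap (fun cat =>
          ((PySem.Dict.ofList targets).getD cat []).map (fun tid => (cat, tid))) := by
    intro targets acc
    simp only [List.foldl_cons, List.foldl_nil, PySem.List.foldl_append_singleton_eq_map,
      List.flatMap_cons, List.flatMap_nil, List.append_nil, List.append_assoc]
  have h2 := PySem.List.foldl_congr_mem (l := vs) (init := ([] : List (String × String)))
    (f := fun (acc : List (String × String)) targets =>
      ["node", "chassis", "rack"].foldl
        (fun acc cat =>
          ((PySem.Dict.ofList targets).getD cat []).foldl
            (fun acc tid => acc ++ [(cat, tid)]) acc)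
        acc)
    (g := fun (acc : List (String × String)) targets =>
      acc ++ ["node", "chassis", "rack"].flatMap (fun cat =>
        ((PySem.Dict.ofList targets).getD cat []).map (fun tid => (cat, tid))))
    (by intro acc x _; exact h1 x acc)
  rw [h2, PySem.List.foldl_append_eq_flatMap]
  simp

-- the lexicographic comparison B's sort uses is the order of Lex (String × String)
theorem pvSorted2EqSortedLex (xs : List (String × String)) :
    PySem.List.sorted2 xs Prod.fst Prod.snd false
    = PySem.List.sorted xs (fun p => (toLex p : Lex (String × String))) false := by
  rw [PySem.List.sorted_eq_foldl_insertBy]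
  show xs.foldl (fun acc x => PySem.List.insertBy
      (fun a b => decide (a.1 < b.1) || !decide (b.1 < a.1) && decide (a.2 < b.2)) x acc) []
    = xs.foldl (fun acc x => PySem.List.insertBy
      (fun a b => decide ((toLex a : Lex (String × String)) < toLex b)) x acc) []
  have hb : (fun (a b : String × String) => decide (a.1 < b.1) || !decide (b.1 < a.1) && decide (a.2 < b.2))
      = fun a b => decide ((toLex a : Lex (String × String)) < toLex b) := by
    funext a b
    simp only [← decide_not, ← Bool.decide_and, ← Bool.decide_or, decide_eq_decide]
    rw [Prod.Lex.toLex_lt_toLex]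
    constructor
    · rintro (h | ⟨h1, h2⟩)
      · exact Or.inl h
      · rcases lt_trichotomy a.1 b.1 with h' | h' | h'
        · exact Or.inl h'
        · exact Or.inr ⟨h', h2⟩
        · exact absurd h' h1
    · rintro (h | ⟨h1, h2⟩)
      · exact Or.inl h
      · exact Or.inr ⟨by simp [h1], h2⟩
  rw [hb]

-- scan invariant: on a lex-sorted tail, counting pair ≠ prev counts the distinct
-- elements different from the previous one
theorem pvScanAux :
    ∀ (l : List (String × String)) (a : String × String) (c : Int),
      ((a :: l).Pairwise (fun x y => (toLex x : Lex (String × String)) ≤ toLex y)) →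
      (l.foldl
        (fun (st : Int × Option (String × String)) pair =>
          (if some pair ≠ st.2 then st.1 + 1 else st.1, some pair))
        (c, some a)).1
      = c + (((PySem.Set.ofList l).filter (fun y => y ≠ a)).length : Int) := by
  intro l
  induction l with
  | nil => intro a c _; simp
  | cons x l ih =>
      intro a c h
      have hax : (toLex a : Lex (String × String)) ≤ toLex x := (List.pairwise_cons.mp h).1 x (by simp)
      have hxl : (x :: l).Pairwise (fun p q => (toLex p : Lex (String × String)) ≤ toLex q) :=
        (List.pairwise_cons.mp h).2
      by_cases hxa : x = a
      · subst hxa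
        have := ih x c hxl
        simp only [List.foldl_cons] at *
        simp only [ne_eq, not_true_eq_false, not_false_eq_true, if_neg,
          decide_not] at *
        rw [PySem.Set.ofList_cons]
        simp only [PySem.Set.discard, List.filter_filter, List.filter_cons]
        have hpred : ∀ y : String × String,
            ((!decide (y = x)) && !(y == x)) = !decide (y = x) := by
          intro y; by_cases hy : y = x <;> simp [hy]
        simp only [hpred]
        simpa using this
      · have hnotmem : a ∉ l := by
          intro hal
          have hxa' : (toLex x : Lex (String × String)) ≤ toLex a :=
            (List.pairwise_cons.mp hxl).1 a hal
          exact hxa (toLex.injective (le_antisymm hxa' hax))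
        have := ih x (c + 1) hxl
        simp only [List.foldl_cons]
        rw [if_pos (by simp [hxa])]
        rw [this]
        rw [PySem.Set.ofList_cons]
        simp only [PySem.Set.discard, List.filter_cons]
        rw [if_pos (by simp [hxa])]
        have hskip : List.filter (fun y => decide ¬(y = a)) (List.filter (fun y => !(y == x)) (PySem.Set.ofList l))
            = List.filter (fun y => !(y == x)) (PySem.Set.ofList l) := by
          rw [List.filter_eq_self]
          intro y hy
          have : y ∈ l := (PySem.Set.mem_ofList l y).mp (List.mem_filter.mp hy).1
          simp only [decide_eq_true_eq]
          intro hya; exact hnotmem (hya ▸ this)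
        have hpred2 : ∀ y : String × String, (!(y == x)) = (decide ¬(y = x)) := by
          intro y; by_cases hy : y = x <;> simp [hy]
        simp only [ne_eq, decide_not] at hskip ⊢
        rw [List.length_cons, hskip]
        simp only [hpred2, decide_not]
        push_cast
        ring

-- full scan on a lex-sorted list counts its distinct elements
theorem pvScanSorted (l : List (String × String))
    (h : l.Pairwise (fun x y => (toLex x : Lex (String × String)) ≤ toLex y)) :
    (l.foldl
      (fun (st : Int × Option (String × String)) pair =>
        (if some pair ≠ st.2 then st.1 + 1 else st.1, some pair))
      (0, none)).1
    = ((PySem.Set.ofList l).length : Int) := by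
  cases l with
  | nil => simp
  | cons x l =>
      simp only [List.foldl_cons]
      rw [if_pos (by simp)]
      rw [pvScanAux l x (0 + 1) h]
      rw [PySem.Set.ofList_cons]
      simp only [PySem.Set.discard]
      have hpred2 : ∀ y : String × String, (!(y == x)) = (decide ¬(y = x)) := by
        intro y; by_cases hy : y = x <;> simp [hy]
      simp only [List.length_cons, hpred2, ne_eq, decide_not]
      push_cast
      ring

-- the distinct (cat, id) pairs, listed per category
theorem pvPairsCard (vs : List (List (String × List String))) :
    ((PySem.Set.ofList
      (vs.flatMap (fun targets =>
        ["node", "chassis", "rack"].flatMap (fun cat =>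
          ((PySem.Dict.ofList targets).getD cat []).map (fun tid => (cat, tid)))))).length : Int)
    = ((PySem.Set.ofList (vs.flatMap (fun t => (PySem.Dict.ofList t).getD "node" []))).length : Int)
      + ((PySem.Set.ofList (vs.flatMap (fun t => (PySem.Dict.ofList t).getD "chassis" []))).length : Int)
      + ((PySem.Set.ofList (vs.flatMap (fun t => (PySem.Dict.ofList t).getD "rack" []))).length : Int) := by
  set fN := fun t : List (String × List String) => (PySem.Dict.ofList t).getD "node" [] with hfN
  set fC := fun t : List (String × List String) => (PySem.Dict.ofList t).getD "chassis" [] with hfC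
  set fR := fun t : List (String × List String) => (PySem.Dict.ofList t).getD "rack" [] with hfR
  set ys :=
    ((PySem.Set.ofList (vs.flatMap fN)).map (fun i => ("node", i)))
    ++ ((PySem.Set.ofList (vs.flatMap fC)).map (fun i => ("chassis", i)))
    ++ ((PySem.Set.ofList (vs.flatMap fR)).map (fun i => ("rack", i))) with hys
  have hinj : ∀ s : String, Function.Injective (fun i : String => (s, i)) := by
    intro s a b hab; simpa using hab
  have hnodup : ys.Nodup := by
    rw [hys]
    refine List.Nodup.append (List.Nodup.append ?_ ?_ ?_) ?_ ?_
    · exact (PySem.Set.nodup_ofList _).map (hinj _)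
    · exact (PySem.Set.nodup_ofList _).map (hinj _)
    · intro p hp hq
      simp only [List.mem_map] at hp hq
      obtain ⟨a, _, rfl⟩ := hp
      obtain ⟨b, _, hb⟩ := hq
      simp at hb
    · exact (PySem.Set.nodup_ofList _).map (hinj _)
    · intro p hp hq
      simp only [List.mem_append, List.mem_map] at hp hq
      obtain ⟨b, _, hb⟩ := hq
      rcases hp with ⟨a, _, rfl⟩ | ⟨a, _, rfl⟩ <;> simp at hb
  have hmem : ∀ p : String × String,
      p ∈ vs.flatMap (fun targets =>
        ["node", "chassis", "rack"].flatMap (fun cat =>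
          ((PySem.Dict.ofList targets).getD cat []).map (fun tid => (cat, tid))))
      ↔ p ∈ ys := by
    intro p
    rw [hys]
    simp only [List.mem_flatMap, List.mem_append, List.mem_map, PySem.Set.mem_ofList,
      List.mem_cons, List.not_mem_nil, or_false, hfN, hfC, hfR]
    constructor
    · rintro ⟨t, ht, cat, (rfl | rfl | rfl), tid, htid, rfl⟩
      · exact Or.inl (Or.inl ⟨tid, ⟨t, ht, htid⟩, rfl⟩)
      · exact Or.inl (Or.inr ⟨tid, ⟨t, ht, htid⟩, rfl⟩)
      · exact Or.inr ⟨tid, ⟨t, ht, htid⟩, rfl⟩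
    · rintro ((⟨tid, ⟨t, ht, htid⟩, rfl⟩ | ⟨tid, ⟨t, ht, htid⟩, rfl⟩) | ⟨tid, ⟨t, ht, htid⟩, rfl⟩)
      · exact ⟨t, ht, "node", Or.inl rfl, tid, htid, rfl⟩
      · exact ⟨t, ht, "chassis", Or.inr (Or.inl rfl), tid, htid, rfl⟩
      · exact ⟨t, ht, "rack", Or.inr (Or.inr rfl), tid, htid, rfl⟩
  rw [pvLenOfListCongr _ ys hmem, PySem.Set.ofList_eq_self_of_nodup ys hnodup]
  rw [hys]
  simp only [List.length_append, List.length_map]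
  push_cast
  ring

-- ===== VERDICT (by name: the statement is the Claim_ definition above) =====
theorem count_target_ids_py_spec : Claim_equal_count_target_ids_py := by
  intro t _
  unfold Spec_count_target_ids_py count_target_ids_py count_target_ids_py_alt
  simp only [pvFoldl_triple_update, PySem.Set.update_empty, pvPairsEq, pvSorted2EqSortedLex]
  set pairs := ((PySem.Dict.ofList t).values).flatMap (fun targets =>
    ["node", "chassis", "rack"].flatMap (fun cat =>
      ((PySem.Dict.ofList targets).getD cat []).map (fun tid => (cat, tid)))) with hpairs
  rw [pvScanSorted _ (PySem.List.sorted_pairwise pairs (fun p => (toLex p : Lex (String × String))))]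
  have hperm : (PySem.List.sorted pairs (fun p => (toLex p : Lex (String × String))) false).Perm pairs :=
    PySem.List.sorted_perm pairs _ false
  rw [pvLenOfListCongr _ pairs (fun a => hperm.mem_iff)]
  rw [pvPairsCard]
  simp [PySem.Set.len]
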